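-- pv_equiv track=rewrite | github.com/SahnawazShaban/Leetcode-and-GFG-Problems | Code Battle Contest/Contest-1/3) Minimum Difference Between Highest and Lowest of K Scores.py | minimumDifference
-- ===== SOURCE A (Python) =====
-- from typing import List
--
-- def minimumDifference(nums: List[int], k: int) -> int:
--     n = len(nums)
--
--     if n < k:
--         return 0
--
--     nums.sort()
--
--     window = []
--     window_max = 0
--     ans = float('inf')
--     for i in range(n+1):
--         if k > 0:
--             window.append(nums[i])
--             k -= 1
--             continue
--
--         window_max = window[len(window)-1] - window[0]
--         ans = min(ans,window_max)
--
--         if i == n: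
--             break
--
--         window.pop(0)
--         window.append(nums[i])
--
--     return ans
--
--     # ---------------------------------------
--
--     if len(nums) <= 1:
--         return 0
--
--     nums = sorted(nums)
--     res = nums[k-1] - nums[0]
--
--     for i in range(k, len(nums)):
--         res = min(res, nums[i] - nums[i - k + 1])
--
--     return res
--
--     # ----------------------------------------
--
--     n = len(scores)
--     scores.sort()
--     l,r = 0,k-1
--     ans = float('inf')
--
--     while r < n:
--         ans = min(ans,scores[r]-scores[l])
--         l += 1
--         r += 1
--
--     return ans
-- ===== SOURCE B (Python) =====
-- def minimumDifference(nums, k):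
--     if len(nums) < k:
--         return 0
--     s = sorted(nums)
--     best = s[k - 1] - s[0]
--     for i in range(1, len(s) - k + 1):
--         best = min(best, s[i + k - 1] - s[i])
--     return best
-- ===== Notes on version B (the rewrite author's own statement) =====
-- stated objective: faster
-- what changed: Replaces A's explicit window list maintained with append/pop(0) (each pop is O(k)) by direct index-based sliding over the sorted list, so the scan is O(n) instead of O(n*k).
import Mathlib
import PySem

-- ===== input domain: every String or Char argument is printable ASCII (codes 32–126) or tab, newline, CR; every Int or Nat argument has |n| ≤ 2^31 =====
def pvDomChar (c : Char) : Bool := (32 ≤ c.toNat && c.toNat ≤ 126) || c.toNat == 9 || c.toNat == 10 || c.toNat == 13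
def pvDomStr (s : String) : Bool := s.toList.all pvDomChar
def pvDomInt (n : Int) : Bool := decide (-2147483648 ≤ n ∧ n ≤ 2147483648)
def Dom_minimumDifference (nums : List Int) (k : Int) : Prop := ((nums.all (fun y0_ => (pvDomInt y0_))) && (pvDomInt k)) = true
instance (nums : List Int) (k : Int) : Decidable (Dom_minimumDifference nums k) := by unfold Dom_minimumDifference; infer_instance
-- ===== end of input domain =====

-- B replaces A's window list maintained with append/pop(0) by index-based sliding over
-- the sorted list (objective: faster scan; a timing run measures the claim).
-- NOTE: Python A sorts `nums` in place (observable mutation); B does not. The equivalence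
-- proved here is about the RETURN value only.

-- ===== PORT A =====
-- A's loop body; `ans = float('inf')` with `min` is modelled as Option Int (none = inf);
-- window.pop(0) is ported as .tail, exact whenever window ≠ [] (true at every reach under Pre_).
def stepA (s : List Int) (n : Int) (st : List Int × Int × Option Int) (i : Int) :
    List Int × Int × Option Int :=
  match st with
  | (window, kk, ans) =>
    if 0 < kk then
      (window ++ [PySem.List.pyGetD s i 0], kk - 1, ans)
    else
      let wmax := PySem.List.pyGetD window (PySem.List.len window - 1) 0 -
                  PySem.List.pyGetD window 0 0
      let ans' : Option Int := some (match ans with | none => wmax | some a => min a wmax)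
      if i = n then (window, kk, ans')
      else (window.tail ++ [PySem.List.pyGetD s i 0], kk, ans')

def minimumDifference (nums : List Int) (k : Int) : Int :=
  let n := PySem.List.len nums
  if n < k then 0
  else
    let s := PySem.List.sorted nums id false
    let fin := (PySem.List.pyRange 0 (n + 1) 1).foldl (stepA s n) ([], k, none)
    fin.2.2.getD 0   -- under Pre_ the ans is always some _; the default is never used

-- ===== PORT B =====
def minimumDifference_alt (nums : List Int) (k : Int) : Int :=
  if PySem.List.len nums < k then 0
  else
    let s := PySem.List.sorted nums id false
    (PySem.List.pyRange 1 (PySem.List.len s - k + 1) 1).foldl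
      (fun best i => min best (PySem.List.pyGetD s (i + k - 1) 0 - PySem.List.pyGetD s i 0))
      (PySem.List.pyGetD s (k - 1) 0 - PySem.List.pyGetD s 0 0)

-- ===== PRECONDITION & SPEC =====
-- Pre_ excludes k ≤ 0, on which A raises IndexError (empty window / negative indexing).
def Pre_minimumDifference (nums : List Int) (k : Int) : Prop := 1 ≤ k
instance (nums : List Int) (k : Int) : Decidable (Pre_minimumDifference nums k) := by
  unfold Pre_minimumDifference; infer_instance
def pvWitness_minimumDifference : List Int × Int := ([9, 4, 1, 7], 2)

def Spec_minimumDifference (nums : List Int) (k : Int) (out : Int) : Prop :=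
  out = minimumDifference_alt nums k
instance (nums : List Int) (k : Int) (out : Int) : Decidable (Spec_minimumDifference nums k out) := by
  unfold Spec_minimumDifference; infer_instance

-- ===== CLAIM (what is proved, stated in full; the proofs are below) =====
def Claim_equal_minimumDifference : Prop := ∀ (nums : List Int) (k : Int),
  Dom_minimumDifference nums k → Pre_minimumDifference nums k →
  Spec_minimumDifference nums k (minimumDifference nums k)

-- ===== LEMMAS AND PROOFS =====

-- s[j] with default (proof-side abbreviation)
def gS (s : List Int) (j : Int) : Int := PySem.List.pyGetD s j 0
-- the width-k window difference starting at j
def dS (s : List Int) (k j : Int) : Int := gS s (j + k - 1) - gS s j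
-- A's running-min step on the Option Int accumulator
def mstep (s : List Int) (k : Int) (a : Option Int) (j : Int) : Option Int :=
  some (match a with | none => dS s k j | some x => min x (dS s k j))

theorem mfold (s : List Int) (k : Int) (l : List Int) (a : Int) :
    l.foldl (mstep s k) (some a) =
      some (l.foldl (fun b j => min b (dS s k j)) a) := by
  induction l generalizing a with
  | nil => rfl
  | cons x xs ih => simp [List.foldl, mstep, ih]

theorem pyGetD_append_singleton (pre : List Int) (y d : Int) :
    PySem.List.pyGetD (pre ++ [y]) (pre.length : Int) d = y := by
  rw [PySem.List.pyGetD_natCast]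
  simp [List.getD_eq_getElem?_getD]

-- the last-minus-first of the window (pyRange (i-k) i).map g equals dS (i-k)
theorem window_extremes (s : List Int) (k i : Int) (hk : 1 ≤ k) :
    PySem.List.pyGetD ((PySem.List.pyRange (i - k) i 1).map (gS s))
        (PySem.List.len ((PySem.List.pyRange (i - k) i 1).map (gS s)) - 1) 0 -
      PySem.List.pyGetD ((PySem.List.pyRange (i - k) i 1).map (gS s)) 0 0 =
      dS s k (i - k) := by
  have h1 : i - k ≤ i - 1 := by omega
  have hsplit : PySem.List.pyRange (i - k) i 1 =
      PySem.List.pyRange (i - k) (i - 1) 1 ++ [i - 1] := by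
    have h := PySem.List.pyRange_one_succ_right (a := i - k) (b := i - 1) h1
    rw [show i - 1 + 1 = i by ring] at h
    exact h

  have hcons : PySem.List.pyRange (i - k) i 1 = (i - k) :: PySem.List.pyRange (i - k + 1) i 1 :=
    PySem.List.pyRange_one_cons (by omega)
  have hfirst : PySem.List.pyGetD ((PySem.List.pyRange (i - k) i 1).map (gS s)) 0 0 = gS s (i - k) := by
    rw [hcons]; simp [PySem.List.pyGetD_zero_cons]
  have hlen : PySem.List.len ((PySem.List.pyRange (i - k) i 1).map (gS s)) - 1 =
      (((PySem.List.pyRange (i - k) (i - 1) 1).map (gS s)).length : Int) := by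
    rw [hsplit]; simp
  have hlast : PySem.List.pyGetD ((PySem.List.pyRange (i - k) i 1).map (gS s))
      (PySem.List.len ((PySem.List.pyRange (i - k) i 1).map (gS s)) - 1) 0 = gS s (i - 1) := by
    rw [hlen, hsplit, List.map_append]
    simpa using pyGetD_append_singleton ((PySem.List.pyRange (i - k) (i - 1) 1).map (gS s)) (gS s (i - 1)) 0
  rw [hfirst, hlast, dS]
  congr 1
  ring_nf

-- fill phase: the first m iterations only append s[i] to the window
theorem fillA (s : List Int) (n : Int) :
    ∀ (m : Nat) (a : Int) (w : List Int) (ans : Option Int),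
    (PySem.List.pyRange a (a + (m : Int)) 1).foldl (stepA s n) (w, (m : Int), ans) =
      (w ++ (PySem.List.pyRange a (a + (m : Int)) 1).map (gS s), 0, ans) := by
  intro m
  induction m with
  | zero => intro a w ans; simp
  | succ m ih =>
    intro a w ans
    have hcons : PySem.List.pyRange a (a + ((m + 1 : Nat) : Int)) 1 =
        a :: PySem.List.pyRange (a + 1) (a + ((m + 1 : Nat) : Int)) 1 :=
      PySem.List.pyRange_one_cons (by push_cast; omega)
    rw [hcons]
    have hstep : stepA s n (w, ((m + 1 : Nat) : Int), ans) a =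
        (w ++ [PySem.List.pyGetD s a 0], ((m + 1 : Nat) : Int) - 1, ans) := by
      simp [stepA]
    have harg : a + ((m + 1 : Nat) : Int) = (a + 1) + ((m : Nat) : Int) := by push_cast; ring
    have hm1 : ((m + 1 : Nat) : Int) - 1 = ((m : Nat) : Int) := by push_cast; ring
    simp only [List.foldl_cons, hstep, hm1, harg]
    rw [ih (a + 1) (w ++ [PySem.List.pyGetD s a 0]) ans]
    simp [gS, List.append_assoc]

-- slide phase: from window (pyRange (i-k) i).map g, the remaining loop computes the
-- running min of dS over window start positions
theorem slideA (s : List Int) (n k : Int) (hk : 1 ≤ k) :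
    ∀ (m : Nat) (i : Int), i + (m : Int) = n → k ≤ i → ∀ (acc : Option Int),
    ((PySem.List.pyRange i (n + 1) 1).foldl (stepA s n)
        ((PySem.List.pyRange (i - k) i 1).map (gS s), 0, acc)).2.2 =
      (PySem.List.pyRange (i - k) (n - k + 1) 1).foldl (mstep s k) acc := by
  intro m
  induction m with
  | zero =>
    intro i hin hki acc
    have hi : i = n := by omega
    subst hi
    rw [show PySem.List.pyRange i (i + 1) 1 = [i] from PySem.List.pyRange_one_singleton i,
        show PySem.List.pyRange (i - k) (i - k + 1) 1 = [i - k] from PySem.List.pyRange_one_singleton _]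
    simp only [List.foldl_cons, List.foldl_nil]
    have hwe := window_extremes s k i hk
    simp only [stepA, if_neg (lt_irrefl (0:Int)), mstep]
    rw [hwe]
    simp
  | succ m ih =>
    intro i hin hki acc
    have hlt : i < n := by push_cast at hin; omega
    rw [PySem.List.pyRange_one_cons (by omega : i < n + 1)]
    simp only [List.foldl_cons]
    have hwin : stepA s n ((PySem.List.pyRange (i - k) i 1).map (gS s), 0, acc) i =
        ((PySem.List.pyRange (i + 1 - k) (i + 1) 1).map (gS s), 0, mstep s k acc (i - k)) := by
      simp only [stepA, if_neg (lt_irrefl (0:Int)), if_neg (by omega : ¬ i = n)]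
      rw [window_extremes s k i hk]
      refine Prod.ext ?_ (Prod.ext rfl ?_)
      · -- new window
        have hcons : PySem.List.pyRange (i - k) i 1 = (i - k) :: PySem.List.pyRange (i - k + 1) i 1 :=
          PySem.List.pyRange_one_cons (by omega)
        have hsucc : PySem.List.pyRange (i - k + 1) (i + 1) 1 =
            PySem.List.pyRange (i - k + 1) i 1 ++ [i] :=
          PySem.List.pyRange_one_succ_right (by omega)
        rw [hcons, show i + 1 - k = i - k + 1 by ring, hsucc]
        simp [gS]
      · simp [mstep]
    rw [hwin]
    rw [ih (i + 1) (by push_cast at hin ⊢; omega) (by omega) (mstep s k acc (i - k))]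
    rw [PySem.List.pyRange_one_cons (by omega : i - k < n - k + 1)]
    simp only [List.foldl_cons]
    rw [show i + 1 - k = i - k + 1 by ring]

-- ===== VERDICT (by name: the statement is the Claim_ definition above) =====
theorem minimumDifference_spec : Claim_equal_minimumDifference := by
  intro nums k hdom hk
  unfold Spec_minimumDifference minimumDifference minimumDifference_alt
  by_cases hnk : PySem.List.len nums < k
  · simp only [PySem.List.len_eq] at hnk
    simp [hnk]
  · simp only [if_neg hnk]
    set s := PySem.List.sorted nums id false with hs
    have hlen : PySem.List.len s = PySem.List.len nums := by
      simp [hs, PySem.List.len]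
    set n := PySem.List.len nums with hn
    have hkn : k ≤ n := by omega
    have hpre : 1 ≤ k := hk
    -- split A's range at k
    have hsplit : PySem.List.pyRange 0 (n + 1) 1 =
        PySem.List.pyRange 0 k 1 ++ PySem.List.pyRange k (n + 1) 1 :=
      PySem.List.pyRange_one_append 0 k (n + 1) (by omega) (by omega)
    rw [hsplit, List.foldl_append]
    -- fill phase
    have hkc : (k.toNat : Int) = k := by omega
    have hfill := fillA s n k.toNat 0 [] none
    rw [hkc] at hfill
    simp only [zero_add] at hfill
    rw [hfill]
    -- slide phase
    rw [List.nil_append, show ((PySem.List.pyRange 0 k 1).map (gS s), (0:Int), (none : Option Int)) =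
        ((PySem.List.pyRange (k - k) k 1).map (gS s), (0:Int), (none : Option Int)) by rw [show k - k = 0 by ring]]
    rw [slideA s n k hpre (n - k).toNat k (by omega) (le_refl k) none]
    rw [show k - k = 0 by ring]
    -- peel the first sliding step out of the Option fold
    rw [PySem.List.pyRange_one_cons (by omega : (0:Int) < n - k + 1)]
    simp only [List.foldl_cons]
    rw [show mstep s k none 0 = some (dS s k 0) from rfl]
    rw [mfold]
    simp only [Option.getD_some]
    rw [hlen]
    have hd0 : dS s k 0 = PySem.List.pyGetD s (k - 1) 0 - PySem.List.pyGetD s 0 0 := by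
      simp [dS, gS]
    rw [hd0]
    have hfun : (fun (b j : Int) => min b (dS s k j)) =
        (fun best i => min best (PySem.List.pyGetD s (i + k - 1) 0 - PySem.List.pyGetD s i 0)) := by
      funext b j
      simp [dS, gS]
    rw [hfun]
    norm_num
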